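-- pv_equiv track=rewrite | github.com/larranaga/UNAL-data-mining | Project/Preprocessing/platform_unified_processing.py | categorize_na_sales
-- ===== SOURCE A (Python) =====
-- def categorize_na_sales(entry):
--     sales = entry["NA_Sales"]
--     top = 10000000
--     if sales > top:
--         return "Top"
--     category = 0
--     delta = 500000
--     low = 500000
--     for i in range(low, top + 1, delta):
--         if(sales >= i - delta and sales <= i):
--             return str(category)
--         category+=1
--     return "error"
-- ===== SOURCE B (Python) =====
-- def categorize_na_sales(entry):
--     sales = entry["NA_Sales"]
--     if sales > 10000000:
--         return "Top"
--     if sales < 0: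
--         return "error"
--     if sales == 0:
--         return "0"
--     return str(-(-sales // 500000) - 1)
-- ===== Notes on version B (the rewrite author's own statement) =====
-- stated objective: simpler
-- what changed: Replaced the 20-step threshold-scanning loop over range(500000, 10000001, 500000) with a direct closed-form bucket computation via ceiling division (str(-(-sales // 500000) - 1)), with guards for Top, negative and zero sales.
import Mathlib
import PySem

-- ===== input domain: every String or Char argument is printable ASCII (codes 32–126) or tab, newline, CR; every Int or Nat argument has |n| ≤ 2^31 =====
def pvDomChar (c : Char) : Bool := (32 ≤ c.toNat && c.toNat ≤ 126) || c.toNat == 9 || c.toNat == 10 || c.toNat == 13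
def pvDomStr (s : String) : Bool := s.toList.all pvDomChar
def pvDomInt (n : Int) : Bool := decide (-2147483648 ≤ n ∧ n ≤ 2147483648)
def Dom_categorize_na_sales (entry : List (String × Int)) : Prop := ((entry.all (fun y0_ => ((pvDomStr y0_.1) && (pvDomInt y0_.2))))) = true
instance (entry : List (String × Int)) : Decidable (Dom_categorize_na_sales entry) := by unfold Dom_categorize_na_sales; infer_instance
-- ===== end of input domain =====

-- B replaces A's 20-step threshold-scanning loop by a closed-form ceiling-division bucket
-- computation (objective: simpler).

-- ===== PORT A =====
-- the for-loop with early return: category counts up alongside the range elements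
def pvLoopA (sales : Int) : List Int → Int → String
  | [], _ => "error"
  | i :: rest, category =>
      if sales ≥ i - 500000 ∧ sales ≤ i then PySem.Int.toStr category
      else pvLoopA sales rest (category + 1)

def categorize_na_sales (entry : List (String × Int)) : String :=
  match (PySem.Dict.mk entry).get? "NA_Sales" with
  | none => ""  -- unreachable under Pre_ (Python raises KeyError here)
  | some sales =>
      if sales > 10000000 then "Top"
      else pvLoopA sales (PySem.List.pyRange 500000 (10000000 + 1) 500000) 0

-- ===== PORT B =====
def categorize_na_sales_alt (entry : List (String × Int)) : String :=
  match (PySem.Dict.mk entry).get? "NA_Sales" with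
  | none => "KeyError"  -- unreachable under Pre_ (Python raises KeyError here)
  | some sales =>
      if sales > 10000000 then "Top"
      else if sales < 0 then "error"
      else if sales = 0 then "0"
      else PySem.Int.toStr (-(PySem.Int.floordiv (-sales) 500000) - 1)

-- ===== PRECONDITION & SPEC =====
-- Pre_ excludes exactly the inputs without an "NA_Sales" key, on which Python A raises KeyError.
def Pre_categorize_na_sales (entry : List (String × Int)) : Prop :=
  "NA_Sales" ∈ entry.map Prod.fst
instance (entry : List (String × Int)) : Decidable (Pre_categorize_na_sales entry) := by
  unfold Pre_categorize_na_sales; infer_instance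

def pvWitness_categorize_na_sales : (List (String × Int)) := [("NA_Sales", 750000)]

def Spec_categorize_na_sales (entry : List (String × Int)) (out : String) : Prop := out = categorize_na_sales_alt entry
instance (entry : List (String × Int)) (out : String) : Decidable (Spec_categorize_na_sales entry out) := by unfold Spec_categorize_na_sales; infer_instance

-- ===== CLAIM (what is proved, stated in full; the proofs are below) =====
def Claim_equal_categorize_na_sales : Prop := ∀ (entry : List (String × Int)), Dom_categorize_na_sales entry → Pre_categorize_na_sales entry → Spec_categorize_na_sales entry (categorize_na_sales entry)

-- ===== LEMMAS AND PROOFS =====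

set_option maxHeartbeats 2000000 in
lemma pvRange_lit : PySem.List.pyRange 500000 (10000000 + 1) 500000 =
    [500000, 1000000, 1500000, 2000000, 2500000, 3000000, 3500000, 4000000, 4500000,
     5000000, 5500000, 6000000, 6500000, 7000000, 7500000, 8000000, 8500000, 9000000,
     9500000, 10000000] := by decide

set_option maxHeartbeats 4000000 in
lemma pvLoop_eq_closed (s : Int) (hs : s ≤ 10000000) :
    pvLoopA s (PySem.List.pyRange 500000 (10000000 + 1) 500000) 0 =
      (if s < 0 then "error"
       else if s = 0 then "0"
       else PySem.Int.toStr (-(PySem.Int.floordiv (-s) 500000) - 1)) := by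
  rw [pvRange_lit]
  have hc : s < 0 ∨ s = 0 ∨ (0 < s ∧ s ≤ 500000) ∨ (500000 < s ∧ s ≤ 1000000) ∨ (1000000 < s ∧ s ≤ 1500000) ∨ (1500000 < s ∧ s ≤ 2000000) ∨ (2000000 < s ∧ s ≤ 2500000) ∨ (2500000 < s ∧ s ≤ 3000000) ∨ (3000000 < s ∧ s ≤ 3500000) ∨ (3500000 < s ∧ s ≤ 4000000) ∨ (4000000 < s ∧ s ≤ 4500000) ∨ (4500000 < s ∧ s ≤ 5000000) ∨ (5000000 < s ∧ s ≤ 5500000) ∨ (5500000 < s ∧ s ≤ 6000000) ∨ (6000000 < s ∧ s ≤ 6500000) ∨ (6500000 < s ∧ s ≤ 7000000) ∨ (7000000 < s ∧ s ≤ 7500000) ∨ (7500000 < s ∧ s ≤ 8000000) ∨ (8000000 < s ∧ s ≤ 8500000) ∨ (8500000 < s ∧ s ≤ 9000000) ∨ (9000000 < s ∧ s ≤ 9500000) ∨ (9500000 < s ∧ s ≤ 10000000) := by omega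
  rcases hc with h|h|h|h|h|h|h|h|h|h|h|h|h|h|h|h|h|h|h|h|h|h <;>
  · repeat (rw [pvLoopA.eq_2]; rw [if_neg (by omega)])
    first
      | (rw [pvLoopA.eq_1]; rw [if_pos (by omega)])
      | (rw [pvLoopA.eq_2]; rw [if_pos (by omega)]
         first
           | (rw [if_neg (by omega)]; rw [if_pos (by omega)]; decide)
           | (rw [if_neg (by omega)]; rw [if_neg (by omega)]
              congr 1
              rw [eq_sub_iff_add_eq]; symm
              rw [PySem.Int.neg_floordiv_neg_eq_iff_of_pos (by norm_num)]
              omega))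

-- ===== VERDICT (by name: the statement is the Claim_ definition above) =====
theorem categorize_na_sales_spec : Claim_equal_categorize_na_sales := by
  intro entry _ _
  unfold Spec_categorize_na_sales categorize_na_sales categorize_na_sales_alt
  cases h : (PySem.Dict.mk entry).get? "NA_Sales" with
  | none =>
      exfalso
      rename_i hpre
      rw [PySem.Dict.get?_eq_none_iff_not_mem_keys] at h
      apply h
      have hpre' : "NA_Sales" ∈ entry.map Prod.fst := hpre
      simpa [PySem.Dict.keys, List.mem_map] using hpre' 
  | some sales =>
      by_cases htop : sales > 10000000
      · simp [htop]
      · simp only [htop, if_false]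
        exact pvLoop_eq_closed sales (by omega)
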